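-- pv_equiv track=rewrite | github.com/TanmayKumar-EngStud/CryptographyPy | Classical Ciphers/Hill Cipher.py | makeKeyMatrix
-- ===== SOURCE A (Python) =====
-- import math
--
-- def makeKeyMatrix(key):
--     matrix = []
--     # I am adding fillers because even if the key's Length is not equivalent to a prefect square
--     # It will still give the correct result.
--     fillers = "abcdefghijklmnopqrstuvwxyz"
--     MAXLEN = math.ceil(math.sqrt(len(key)))
--     for i in range(MAXLEN):
--       temp = []
--       for j in range(MAXLEN):
--         if len(key) < i*MAXLEN + j + 1:
--           temp.append(ord(fillers[0])- 97)
--           fillers = fillers[1:]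
--         else:
--           temp.append(ord(key[i*MAXLEN + j].lower()) -97)
--           fillers = fillers.replace(key[i*MAXLEN + j].lower(), "")
--       matrix.append(temp)
--     return matrix
-- ===== SOURCE B (Python) =====
-- import math
--
-- def makeKeyMatrix(key):
--     # Phase 1: build one flat list of cell values: the key letters (lowercased),
--     # then the alphabet letters not occurring in the lowercased key, in a..z order.
--     lowered = key.lower()
--     used = set(lowered)
--     flat = [ord(c) - 97 for c in lowered]
--     flat += [ord(c) - 97 for c in "abcdefghijklmnopqrstuvwxyz" if c not in used]
--     # Phase 2: reshape into MAXLEN rows of MAXLEN, indexing flat directly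
--     # (IndexError if the fillers run out, as in the original).
--     MAXLEN = math.ceil(math.sqrt(len(key)))
--     return [[flat[r * MAXLEN + c] for c in range(MAXLEN)] for r in range(MAXLEN)]
-- ===== Notes on version B (the rewrite author's own statement) =====
-- stated objective: simpler
-- what changed: A interleaves matrix construction with repeated string mutation of the fillers alphabet inside a nested cell loop; B first builds one flat value list (lowercased key letters, then unused alphabet letters via a set membership test) and then reshapes it into MAXLEN rows by direct indexing.
import Mathlib
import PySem

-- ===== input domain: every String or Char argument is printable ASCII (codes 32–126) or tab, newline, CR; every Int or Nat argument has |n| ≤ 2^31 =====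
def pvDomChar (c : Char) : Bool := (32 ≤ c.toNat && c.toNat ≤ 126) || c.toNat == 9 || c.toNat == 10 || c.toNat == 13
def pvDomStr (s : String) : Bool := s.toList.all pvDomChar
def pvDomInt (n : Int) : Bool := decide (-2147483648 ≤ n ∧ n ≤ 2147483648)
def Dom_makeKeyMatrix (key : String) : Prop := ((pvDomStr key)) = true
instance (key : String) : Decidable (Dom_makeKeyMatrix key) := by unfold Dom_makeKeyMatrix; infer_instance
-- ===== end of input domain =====

-- B replaces A's nested cell loop with interleaved string mutation of the fillers alphabet by a
-- two-phase decomposition: build one flat value list, then reshape it into rows (objective: simpler).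

-- shared helper: math.ceil(math.sqrt n) for a Python int n ≥ 0 (both Pythons compute MAXLEN this way)
def pvCeilSqrtGo (n : Nat) : Nat → Nat → Nat
  | 0, k => k
  | fuel+1, k => if n ≤ k * k then k else pvCeilSqrtGo n fuel (k+1)
def pvCeilSqrt (n : Nat) : Nat := pvCeilSqrtGo n n 0

def pvAlphabet : List Char := "abcdefghijklmnopqrstuvwxyz".toList

-- ===== PORT A =====
-- the body of A's inner 'for j in range(MAXLEN)' loop, line for line
def pvBodyA (ks : List Char) (M i : Nat) (st2 : List Int × List Char) (j : Nat) :
    List Int × List Char :=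
  if ks.length < i * M + j + 1 then
    -- fillers[0]: IndexError when fillers is empty — exactly those inputs are outside Pre_
    (st2.1 ++ [(((PySem.List.pyGet? st2.2 0).getD 'a').toNat : Int) - 97],
     PySem.List.slice st2.2 (some 1) none)                                -- fillers = fillers[1:]
  else
    -- key[i*MAXLEN+j] is in range in this branch (getD's default is never used)
    let c := PySem.Chars.lowerChar (ks.getD (i * M + j) ' ')
    (st2.1 ++ [((c.toNat : Int) - 97)],
     PySem.Chars.replace st2.2 [c] [])                                    -- fillers.replace(c, "")

-- literal transliteration of A: nested loops over range(MAXLEN); state = (matrix/temp, fillers)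
def makeKeyMatrix (key : String) : List (List Int) :=
  let ks := key.toList
  let MAXLEN := pvCeilSqrt ks.length
  let res := (List.range MAXLEN).foldl (fun (st : List (List Int) × List Char) (i : Nat) =>
    let inner := (List.range MAXLEN).foldl (pvBodyA ks MAXLEN i) (([] : List Int), st.2)
    (st.1 ++ [inner.1], inner.2)) (([] : List (List Int)), pvAlphabet)
  res.1

-- ===== PORT B =====
-- literal transliteration of B: flat = lowercased key letters, then the unused alphabet letters;
-- then reshape into MAXLEN rows of width MAXLEN by direct indexing.
-- 'c not in set(lowered)' is membership in lowered itself: ported as !(lowered.contains c).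
def makeKeyMatrix_alt (key : String) : List (List Int) :=
  let lowered := (PySem.Str.lower key).toList
  let flat := lowered.map (fun c => ((c.toNat : Int) - 97))
      ++ (pvAlphabet.filter (fun c => !(lowered.contains c))).map (fun c => ((c.toNat : Int) - 97))
  let MAXLEN := pvCeilSqrt key.toList.length
  (List.range MAXLEN).map (fun r =>
    (List.range MAXLEN).map (fun c =>
      -- flat[r*MAXLEN+c]: IndexError when out of range — exactly those inputs are outside Pre_
      flat.getD (r * MAXLEN + c) 0))

-- ===== PRECONDITION & SPEC =====
-- Pre_ excludes exactly the keys on which Python A raises IndexError (the fillers alphabet is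
-- exhausted before the MAXLEN×MAXLEN matrix is filled); Python B raises IndexError there too.
def Pre_makeKeyMatrix (key : String) : Prop :=
  pvCeilSqrt key.toList.length * pvCeilSqrt key.toList.length ≤
    key.toList.length +
      (pvAlphabet.filter (fun c => !((PySem.Chars.lower key.toList).contains c))).length
instance (key : String) : Decidable (Pre_makeKeyMatrix key) := by
  unfold Pre_makeKeyMatrix; infer_instance

def pvWitness_makeKeyMatrix : String := "hill"

def Spec_makeKeyMatrix (key : String) (out : List (List Int)) : Prop := out = makeKeyMatrix_alt key
instance (key : String) (out : List (List Int)) : Decidable (Spec_makeKeyMatrix key out) := by unfold Spec_makeKeyMatrix; infer_instance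

-- ===== CLAIM (what is proved, stated in full; the proofs are below) =====
def Claim_equal_makeKeyMatrix : Prop := ∀ (key : String), Dom_makeKeyMatrix key → Pre_makeKeyMatrix key → Spec_makeKeyMatrix key (makeKeyMatrix key)

-- ===== LEMMAS AND PROOFS =====

-- the fillers string A holds after the first p cells have been processed
def pvFill (lowered : List Char) (n p : Nat) : List Char :=
  (pvAlphabet.filter (fun c => !((lowered.take p).contains c))).drop (p - n)

-- the value both programs put into cell number p
def pvCell (lowered : List Char) (n p : Nat) : Int :=
  if p < n then ((lowered.getD p ' ').toNat : Int) - 97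
  else ((((pvFill lowered n p).headD 'a').toNat : Int) - 97)

theorem pv_replace_go_single (c : Char) :
    ∀ (fuel : Nat) (l acc : List Char), l.length ≤ fuel →
      PySem.Chars.replace.go [c] [] fuel l acc =
        acc.reverse ++ l.filter (fun x => x != c) := by
  intro fuel
  induction fuel with
  | zero => intro l acc h; cases l <;> simp_all [PySem.Chars.replace.go]
  | succ m ih =>
    intro l acc h
    cases l with
    | nil => simp [PySem.Chars.replace.go]
    | cons a t =>
      by_cases hac : a = c
      · subst hac
        have hpre : ([a].isPrefixOf (a :: t)) = true := by simp [List.isPrefixOf]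
        simp only [PySem.Chars.replace.go, hpre, if_pos]
        rw [ih _ _ (by simpa using Nat.le_of_succ_le_succ h)]
        simp
      · have hpre : ([c].isPrefixOf (a :: t)) = false := by
          simp [List.isPrefixOf]
          exact fun h' => hac (by simpa using h'.symm)
        simp only [PySem.Chars.replace.go, hpre, Bool.false_eq_true, if_false]
        rw [ih _ _ (by simpa using Nat.le_of_succ_le_succ h)]
        simp [hac]

theorem pv_replace_single (fl : List Char) (c : Char) :
    PySem.Chars.replace fl [c] [] = fl.filter (fun x => x != c) := by
  simp only [PySem.Chars.replace]
  rw [if_neg (by simp)]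
  simpa using pv_replace_go_single c fl.length fl [] le_rfl

theorem pv_pyGet?_zero (l : List Char) : PySem.List.pyGet? l 0 = l.head? := by
  cases l <;> simp [PySem.List.pyGet?, PySem.List.pyIdx?]

-- one cell step: from state (temp, pvFill p) A's inner body produces (temp ++ [pvCell p], pvFill (p+1))
theorem pv_step (ks : List Char) (M i j : Nat) (temp : List Int) :
    pvBodyA ks M i (temp, pvFill (PySem.Chars.lower ks) ks.length (i * M + j)) j
      = (temp ++ [pvCell (PySem.Chars.lower ks) ks.length (i * M + j)],
         pvFill (PySem.Chars.lower ks) ks.length (i * M + j + 1)) := by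
  set lowered := PySem.Chars.lower ks with hl
  set n := ks.length with hn
  set p := i * M + j with hp
  have hlen : lowered.length = n := by simp [hl, PySem.Chars.lower, hn]
  by_cases hpn : p < n
  · have hlt : ¬ n < p + 1 := by omega
    have hc : PySem.Chars.lowerChar (ks.getD p ' ') = lowered.getD p ' ' := by
      rw [List.getD_eq_getElem _ _ (by omega), List.getD_eq_getElem _ _ (by omega)]
      simp [hl, PySem.Chars.lower]
    simp only [pvBodyA, ← hp, hc]
    rw [← hn, if_neg hlt]
    simp only [Prod.mk.injEq]
    have hdrop : p - n = 0 := by omega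
    have hdrop1 : p + 1 - n = 0 := by omega
    have htake : lowered.take (p + 1) = lowered.take p ++ [lowered.getD p ' '] := by
      rw [List.take_add_one]
      congr 1
      rw [List.getElem?_eq_getElem (by omega), List.getD_eq_getElem _ _ (by omega)]
      simp
    constructor
    · simp [pvCell, hpn]
    · simp only [pvFill, hdrop, hdrop1, List.drop_zero, pv_replace_single,
        List.filter_filter, htake]
      apply List.filter_congr
      intro x _
      by_cases hx : x = lowered.getD p ' ' <;>
        by_cases hy : x ∈ List.take p lowered <;>
          simp [hx, hy, List.getD, bne, beq_eq_decide]
  · have hge : n < p + 1 := by omega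
    simp only [pvBodyA, ← hp]
    rw [← hn, if_pos hge]
    simp only [Prod.mk.injEq]
    have htake : lowered.take p = lowered := List.take_of_length_le (by omega)
    have htake1 : lowered.take (p + 1) = lowered := List.take_of_length_le (by omega)
    constructor
    · simp [pvCell, hpn, pv_pyGet?_zero, List.headD_eq_head?_getD]
    · simp only [pvFill, PySem.List.slice_from_one, htake, htake1]
      rw [List.tail_drop]
      congr 1
      omega

-- the inner row loop: row i of the matrix, leaving the fillers at state (i+1)*M
theorem pv_inner (ks : List Char) (M i : Nat) : ∀ (m : Nat),
    (List.range m).foldl (pvBodyA ks M i)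
      ([], pvFill (PySem.Chars.lower ks) ks.length (i * M)) =
    ((List.range m).map (fun j => pvCell (PySem.Chars.lower ks) ks.length (i * M + j)),
     pvFill (PySem.Chars.lower ks) ks.length (i * M + m)) := by
  intro m
  induction m with
  | zero => simp
  | succ m ih =>
    rw [List.range_succ, List.foldl_append, List.foldl_cons, List.foldl_nil, ih, pv_step]
    simp [Nat.add_assoc]

-- the outer loop over rows
theorem pv_outer (ks : List Char) (M : Nat) : ∀ (k : Nat),
    (List.range k).foldl (fun (st : List (List Int) × List Char) (i : Nat) =>
      let inner := (List.range M).foldl (pvBodyA ks M i) (([] : List Int), st.2)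
      (st.1 ++ [inner.1], inner.2))
      (([] : List (List Int)), pvFill (PySem.Chars.lower ks) ks.length 0) =
    ((List.range k).map (fun i =>
        (List.range M).map (fun j => pvCell (PySem.Chars.lower ks) ks.length (i * M + j))),
     pvFill (PySem.Chars.lower ks) ks.length (k * M)) := by
  intro k
  induction k with
  | zero => simp
  | succ k ih =>
    rw [List.range_succ, List.foldl_append, List.foldl_cons, List.foldl_nil, ih]
    have hm : k * M + M = (k + 1) * M := by ring
    simp only [pv_inner ks M k M, hm, List.map_append, List.map_cons, List.map_nil]

theorem pv_fill_zero (lowered : List Char) (n : Nat) :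
    pvFill lowered n 0 = pvAlphabet := by
  simp [pvFill]

-- A's matrix, in closed form
theorem pv_A_eq (key : String) :
    makeKeyMatrix key =
      (List.range (pvCeilSqrt key.toList.length)).map (fun i =>
        (List.range (pvCeilSqrt key.toList.length)).map (fun j =>
          pvCell (PySem.Chars.lower key.toList) key.toList.length
            (i * pvCeilSqrt key.toList.length + j))) := by
  unfold makeKeyMatrix
  dsimp only
  rw [← pv_fill_zero (PySem.Chars.lower key.toList) key.toList.length]
  rw [pv_outer key.toList (pvCeilSqrt key.toList.length) (pvCeilSqrt key.toList.length)]

-- B's cell value equals pvCell, given Pre_ and an in-range cell index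
theorem pv_B_cell (key : String) (hpre : Pre_makeKeyMatrix key) (p : Nat)
    (hp : p < pvCeilSqrt key.toList.length * pvCeilSqrt key.toList.length) :
    ((PySem.Chars.lower key.toList).map (fun c => ((c.toNat : Int) - 97))
      ++ (pvAlphabet.filter (fun c => !((PySem.Chars.lower key.toList).contains c))).map
            (fun c => ((c.toNat : Int) - 97))).getD p 0
    = pvCell (PySem.Chars.lower key.toList) key.toList.length p := by
  set lowered := PySem.Chars.lower key.toList with hl
  set n := key.toList.length with hn
  set F := pvAlphabet.filter (fun c => !(lowered.contains c)) with hF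
  have hlen : lowered.length = n := by simp [hl, PySem.Chars.lower, hn]
  have hFlen : pvCeilSqrt n * pvCeilSqrt n ≤ n + F.length := hpre
  by_cases hpn : p < n
  · rw [List.getD_eq_getElem _ _ (by simp [hlen]; omega)]
    rw [List.getElem_append_left (by simp [hlen]; omega)]
    rw [List.getElem_map]
    simp [pvCell, hpn, List.getD, List.getElem?_eq_getElem (show p < lowered.length by omega)]
  · have hFp : p - n < F.length := by omega
    rw [List.getD_eq_getElem _ _ (by simp [hlen]; omega)]
    rw [List.getElem_append_right (by simp [hlen]; omega)]
    rw [List.getElem_map]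
    have htake : lowered.take p = lowered := List.take_of_length_le (by omega)
    have hhead : (pvFill lowered n p).headD 'a' = F[p - n] := by
      simp only [pvFill, htake, ← hF, List.headD_eq_head?_getD, List.head?_drop]
      rw [List.getElem?_eq_getElem hFp]
      rfl
    simp only [pvCell, if_neg hpn, hhead]
    congr 2
    simp [hlen]

-- ===== VERDICT (by name: the statement is the Claim_ definition above) =====
theorem makeKeyMatrix_spec : Claim_equal_makeKeyMatrix := by
  intro key _ hpre
  unfold Spec_makeKeyMatrix
  rw [pv_A_eq]
  unfold makeKeyMatrix_alt
  simp only [PySem.Str.toList_lower]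
  apply List.map_congr_left
  intro i hi
  apply List.map_congr_left
  intro j hj
  rw [pv_B_cell key hpre]
  have hi' := List.mem_range.mp hi
  have hj' := List.mem_range.mp hj
  calc i * pvCeilSqrt key.toList.length + j
      < (i + 1) * pvCeilSqrt key.toList.length := by ring_nf; omega
    _ ≤ _ := Nat.mul_le_mul_right _ (by omega)
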